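-- pv_equiv track=rewrite | github.com/keandk/swift-openstack-ui | swiftapp/utils.py | prefix_list
-- ===== SOURCE A (Python) =====
-- def prefix_list(prefix):
--     prefixes = []
--
--     if prefix:
--         elements = prefix.split('/')
--         elements = filter(None, elements)
--         prefix = ""
--         for element in elements:
--             prefix += element + '/'
--             prefixes.append({'display_name': element, 'full_name': prefix})
--
--     return prefixes
-- ===== SOURCE B (Python) =====
-- def prefix_list(prefix):
--     if not prefix:
--         return []
--     elements = [e for e in prefix.split('/') if e]
--     return [{'display_name': e, 'full_name': '/'.join(elements[:i + 1]) + '/'}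
--             for i, e in enumerate(elements)]
-- ===== Notes on version B (the rewrite author's own statement) =====
-- stated objective: simpler
-- what changed: Replaces the running-prefix string accumulator loop with a direct per-index construction: each full_name is recomputed as '/'.join(elements[:i+1]) + '/' in a single comprehension over enumerate.
import Mathlib
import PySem

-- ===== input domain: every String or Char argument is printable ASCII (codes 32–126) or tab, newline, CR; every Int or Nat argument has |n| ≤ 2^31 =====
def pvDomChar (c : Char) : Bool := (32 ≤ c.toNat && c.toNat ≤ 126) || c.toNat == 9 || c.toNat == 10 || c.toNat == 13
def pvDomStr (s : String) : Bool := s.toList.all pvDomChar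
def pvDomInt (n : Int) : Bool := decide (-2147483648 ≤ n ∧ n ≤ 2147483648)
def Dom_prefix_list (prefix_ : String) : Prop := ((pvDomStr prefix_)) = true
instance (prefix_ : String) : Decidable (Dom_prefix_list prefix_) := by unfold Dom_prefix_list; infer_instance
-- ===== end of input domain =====

-- B replaces A's running-prefix accumulator with a direct slice-and-join per element (simpler decomposition, same values).
-- ===== PORT A =====
-- string concatenation 'prefix + element + "/"' is ported exactly as list-of-chars append via String.ofList/toList
def prefix_list (prefix_ : String) : List (List (String × String)) :=
  if prefix_ ≠ "" then
    let elements := (PySem.Chars.splitOn prefix_.toList ['/']).map String.ofList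
    let elements := elements.filter (fun e => e ≠ "")
    (elements.foldl
      (fun (st : String × List (List (String × String))) element =>
        let p := String.ofList (st.1.toList ++ element.toList ++ ['/'])
        (p, st.2 ++ [[("display_name", element), ("full_name", p)]]))
      ("", [])).2
  else []

-- ===== PORT B =====
def prefix_list_alt (prefix_ : String) : List (List (String × String)) :=
  if prefix_ = "" then []
  else
    let elements := ((PySem.Chars.splitOn prefix_.toList ['/']).map String.ofList).filter
      (fun e => e ≠ "")
    (PySem.List.enumerate elements 0).map (fun ie =>
      [("display_name", ie.2),
       ("full_name",
        String.ofList ((PySem.Str.join "/" (PySem.List.slice elements none (some (ie.1 + 1)))).toList ++ ['/']))])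

-- ===== PRECONDITION & SPEC =====
def Spec_prefix_list (prefix_ : String) (out : List (List (String × String))) : Prop := out = prefix_list_alt prefix_
instance (prefix_ : String) (out : List (List (String × String))) : Decidable (Spec_prefix_list prefix_ out) := by unfold Spec_prefix_list; infer_instance

-- ===== CLAIM (what is proved, stated in full; the proofs are below) =====
def Claim_equal_prefix_list : Prop := ∀ (prefix_ : String), Dom_prefix_list prefix_ → Spec_prefix_list prefix_ (prefix_list prefix_)

-- ===== LEMMAS AND PROOFS =====

-- reference recursion: the items produced from segment list es when the running prefix is p
def refPL (p : List Char) : List String → List (List (String × String))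
  | [] => []
  | e :: es =>
      [("display_name", e), ("full_name", String.ofList (p ++ e.toList ++ ['/']))] ::
        refPL (p ++ e.toList ++ ['/']) es

-- A's fold equals the reference recursion
theorem foldA_eq_ref (es : List String) (s : String)
    (acc : List (List (String × String))) :
    (es.foldl
      (fun (st : String × List (List (String × String))) element =>
        let p := String.ofList (st.1.toList ++ element.toList ++ ['/'])
        (p, st.2 ++ [[("display_name", element), ("full_name", p)]]))
      (s, acc)).2 = acc ++ refPL s.toList es := by
  induction es generalizing s acc with
  | nil => simp [refPL]
  | cons e es ih =>
    simp only [List.foldl_cons, refPL]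
    rw [ih]
    simp

def flatSlash (l : List String) : List Char :=
  l.flatMap (fun e => e.toList ++ ['/'])

theorem join_slash (l : List String) (h : l ≠ []) :
    (PySem.Str.join "/" l).toList ++ ['/'] = flatSlash l := by
  induction l with
  | nil => exact absurd rfl h
  | cons a t ih =>
    cases t with
    | nil =>
      have : (PySem.Str.join "/" [a]).toList = a.toList := by
        rw [PySem.Str.toList_join]; simp [PySem.Chars.join_singleton]
      simp [flatSlash, this]
    | cons b r =>
      have hj : (PySem.Str.join "/" (a :: b :: r)).toList
          = a.toList ++ ['/'] ++ (PySem.Str.join "/" (b :: r)).toList := by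
        rw [PySem.Str.toList_join, List.map_cons, List.map_cons, PySem.Chars.join_cons_cons,
          PySem.Str.toList_join, List.map_cons]
        simp
      have ih' := ih (by simp)
      simp only [flatSlash, List.flatMap_cons] at ih' ⊢
      rw [hj, List.append_assoc, List.append_assoc, ih']
      simp

-- B's enumerate/slice map equals the reference recursion
theorem mapB_eq_ref (els : List String) :
    ∀ (es : List String) (k : Nat), els.drop k = es →
    (PySem.List.enumerate es (k : Int)).map (fun ie =>
      [("display_name", ie.2),
       ("full_name",
        String.ofList ((PySem.Str.join "/" (PySem.List.slice els none (some (ie.1 + 1)))).toList ++ ['/']))])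
      = refPL (flatSlash (els.take k)) es := by
  intro es
  induction es with
  | nil => intro k _; simp [refPL]
  | cons e es ih =>
    intro k hk
    have hlt : k < els.length := by
      by_contra hge
      rw [List.drop_eq_nil_of_le (by omega)] at hk
      exact List.cons_ne_nil e es hk.symm
    have hget : els[k] = e := by
      have := List.drop_eq_getElem_cons hlt
      rw [hk] at this
      exact (List.cons.injEq _ _ _ _ ▸ this).1.symm
    have hdrop : els.drop (k + 1) = es := by
      have := List.drop_eq_getElem_cons hlt
      rw [hk] at this
      exact ((List.cons.injEq _ _ _ _ ▸ this).2).symm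
    have htake : els.take (k + 1) = els.take k ++ [e] := by
      rw [List.take_add_one, List.getElem?_eq_getElem hlt, hget]
      rfl
    have hslice : PySem.List.slice els none (some ((k : Int) + 1)) = els.take (k + 1) := by
      have : ((k : Int) + 1) = ((k + 1 : Nat) : Int) := by push_cast; ring
      rw [this, PySem.List.slice_to_natCast]
    have hjoin : (PySem.Str.join "/" (els.take (k + 1))).toList ++ ['/']
        = flatSlash (els.take k) ++ e.toList ++ ['/'] := by
      rw [join_slash _ (by rw [htake]; simp), htake]
      simp [flatSlash]
    have hrest := ih (k + 1) hdrop
    have hcast : (k : Int) + 1 = ((k + 1 : Nat) : Int) := by push_cast; ring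
    have hflat : flatSlash (els.take (k + 1)) = flatSlash (els.take k) ++ e.toList ++ ['/'] := by
      rw [flatSlash, htake, List.flatMap_append]
      simp [flatSlash]
    rw [PySem.List.enumerate_cons]
    simp only [List.map_cons]
    rw [hslice, hjoin, hcast, hrest, hflat, refPL]

-- ===== VERDICT (by name: the statement is the Claim_ definition above) =====
theorem prefix_list_spec : Claim_equal_prefix_list := by
  intro prefix_ _
  unfold Spec_prefix_list prefix_list prefix_list_alt
  by_cases h : prefix_ = ""
  · simp [h]
  · simp only [h, ne_eq, not_false_eq_true, if_true, if_false]
    rw [foldA_eq_ref]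
    have h0 := mapB_eq_ref
      (((PySem.Chars.splitOn prefix_.toList ['/']).map String.ofList).filter (fun e => e ≠ ""))
      (((PySem.Chars.splitOn prefix_.toList ['/']).map String.ofList).filter (fun e => e ≠ ""))
      0 (by simp)
    simp only [Nat.cast_zero] at h0
    rw [h0]
    simp [flatSlash]
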